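-- pv_equiv track=rewrite | github.com/bobkaneus-svg/chefs-picks | src/consolidate.py | get_vibe
-- ===== SOURCE A (Python) =====
-- def get_vibe(cuisine, price, tags_str=""):
--     """Détermine le vibe du restaurant."""
--     s = (cuisine + " " + tags_str).lower()
--     if any(w in s for w in ["street food", "street", "pita", "sandwich", "panini", "falafel"]):
--         return "street food"
--     if any(w in s for w in ["gastronomique", "fine dining", "étoile", "omakase"]):
--         return "gastronomique"
--     if any(w in s for w in ["bar à vin", "bar a vin", "wine bar", "cave", "tapas"]):
--         return "bar à vins"
--     if any(w in s for w in ["bistrot", "bistro", "bouchon", "troquet", "cantine"]):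
--         return "bistrot"
--     if any(w in s for w in ["boulangerie", "café", "cafe", "patisserie", "pâtisserie"]):
--         return "café"
--     return "casual"
-- ===== SOURCE B (Python) =====
-- # Different strategy: score every keyword in one flat keyword->priority map and
-- # return the label of the GLOBAL MINIMUM matched priority (no ordered group scan).
-- _VIBE_KEYWORDS = {
--     "street food": 0, "street": 0, "pita": 0, "sandwich": 0, "panini": 0, "falafel": 0,
--     "gastronomique": 1, "fine dining": 1, "étoile": 1, "omakase": 1,
--     "bar à vin": 2, "bar a vin": 2, "wine bar": 2, "cave": 2, "tapas": 2,
--     "bistrot": 3, "bistro": 3, "bouchon": 3, "troquet": 3, "cantine": 3,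
--     "boulangerie": 4, "café": 4, "cafe": 4, "patisserie": 4, "pâtisserie": 4,
-- }
-- _VIBE_LABELS = ["street food", "gastronomique", "bar à vins", "bistrot", "café", "casual"]
--
-- def get_vibe(cuisine, price, tags_str=""):
--     s = (cuisine + " " + tags_str).lower()
--     best = min((p for w, p in _VIBE_KEYWORDS.items() if w in s), default=5)
--     return _VIBE_LABELS[best]
-- ===== Notes on version B (the rewrite author's own statement) =====
-- stated objective: alternative
-- what changed: Instead of A's ordered short-circuit chain of five if/any blocks, B scores every keyword in one flat keyword-to-priority map and returns the label of the global minimum matched priority (min with default), which coincides with A's first matching group.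
import Mathlib
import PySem

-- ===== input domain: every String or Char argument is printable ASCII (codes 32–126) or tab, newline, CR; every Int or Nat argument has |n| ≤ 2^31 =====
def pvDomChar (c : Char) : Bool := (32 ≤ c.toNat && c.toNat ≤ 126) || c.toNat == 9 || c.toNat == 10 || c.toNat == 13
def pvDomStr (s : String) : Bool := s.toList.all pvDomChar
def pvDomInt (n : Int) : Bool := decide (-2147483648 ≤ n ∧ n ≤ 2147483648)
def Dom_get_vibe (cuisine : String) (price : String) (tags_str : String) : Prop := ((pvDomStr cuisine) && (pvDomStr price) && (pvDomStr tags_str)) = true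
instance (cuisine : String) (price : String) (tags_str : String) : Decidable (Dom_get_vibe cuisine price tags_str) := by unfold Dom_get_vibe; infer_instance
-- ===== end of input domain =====

-- ===== PORT A =====
-- B replaces A's ordered short-circuit if/any chain by a flat keyword→priority map scored in one pass,
-- returning the label of the global minimum matched priority (alternative decomposition; same cost).
-- Port of A: literal if-chain, each branch 'any(w in s for w in [...])' on s = (cuisine + " " + tags_str).lower().
def get_vibe (cuisine : String) (price : String) (tags_str : String) : String :=
  let s : List Char := PySem.Chars.lower (cuisine.toList ++ " ".toList ++ tags_str.toList)
  if ["street food", "street", "pita", "sandwich", "panini", "falafel"].any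
       (fun w => PySem.Chars.isIn w.toList s) then "street food"
  else if ["gastronomique", "fine dining", "étoile", "omakase"].any
       (fun w => PySem.Chars.isIn w.toList s) then "gastronomique"
  else if ["bar à vin", "bar a vin", "wine bar", "cave", "tapas"].any
       (fun w => PySem.Chars.isIn w.toList s) then "bar à vins"
  else if ["bistrot", "bistro", "bouchon", "troquet", "cantine"].any
       (fun w => PySem.Chars.isIn w.toList s) then "bistrot"
  else if ["boulangerie", "café", "cafe", "patisserie", "pâtisserie"].any
       (fun w => PySem.Chars.isIn w.toList s) then "café"
  else "casual"

-- ===== PORT B =====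
-- the flat keyword → priority dict of Source B (as its items() list, insertion order)
def vibeKeywords : List (String × Nat) :=
  [ ("street food", 0), ("street", 0), ("pita", 0), ("sandwich", 0), ("panini", 0), ("falafel", 0),
    ("gastronomique", 1), ("fine dining", 1), ("étoile", 1), ("omakase", 1),
    ("bar à vin", 2), ("bar a vin", 2), ("wine bar", 2), ("cave", 2), ("tapas", 2),
    ("bistrot", 3), ("bistro", 3), ("bouchon", 3), ("troquet", 3), ("cantine", 3),
    ("boulangerie", 4), ("café", 4), ("cafe", 4), ("patisserie", 4), ("pâtisserie", 4) ]

def vibeLabels : List String :=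
  ["street food", "gastronomique", "bar à vins", "bistrot", "café", "casual"]

-- Port of B: min over the priorities of all matched keywords (default 5), then index the label table.
-- min(gen, default=5) = PySem.List.minD; _VIBE_LABELS[best] with best always in 0..5 = getD.
def get_vibe_alt (cuisine : String) (price : String) (tags_str : String) : String :=
  let s : List Char := PySem.Chars.lower (cuisine.toList ++ " ".toList ++ tags_str.toList)
  let best : Nat :=
    PySem.List.minD
      (vibeKeywords.filterMap (fun wp => if PySem.Chars.isIn wp.1.toList s then some wp.2 else none))
      (fun x => x) 5
  vibeLabels.getD best ""

-- ===== PRECONDITION & SPEC =====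
def Spec_get_vibe (cuisine : String) (price : String) (tags_str : String) (out : String) : Prop := out = get_vibe_alt cuisine price tags_str
instance (cuisine : String) (price : String) (tags_str : String) (out : String) : Decidable (Spec_get_vibe cuisine price tags_str out) := by unfold Spec_get_vibe; infer_instance

-- ===== CLAIM =====
def Claim_equal_get_vibe : Prop := ∀ (cuisine : String) (price : String) (tags_str : String), Dom_get_vibe cuisine price tags_str → Spec_get_vibe cuisine price tags_str (get_vibe cuisine price tags_str)

-- ===== LEMMAS AND PROOFS =====

-- a keyword block of the flat table contributes replicate (count of matches) i to the matched list
lemma blk_replicate (c : String → Bool) (i : Nat) (ws : List String) :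
    ws.filterMap (fun w => if c w then some i else none) = List.replicate (ws.countP c) i := by
  induction ws with
  | nil => simp
  | cons w t ih =>
    by_cases h : c w <;> simp [h, ih, List.replicate_succ]

-- first minimal element with a lower bound: minD returns exactly that bound
lemma minD_eq_of_mem_of_le (xs : List Nat) (k d : Nat) (hm : k ∈ xs)
    (hlb : ∀ x ∈ xs, k ≤ x) : PySem.List.minD xs (fun x => x) d = k := by
  cases h : PySem.List.min? xs (fun x => x) with
  | none =>
    rw [PySem.List.min?_eq_none_iff] at h
    simp [h] at hm
  | some m =>
    have h1 : m ∈ xs := PySem.List.min?_mem h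
    have h2 := PySem.List.min?_isMin h k hm
    have h3 := hlb m h1
    simp only [PySem.List.minD, h, Option.getD_some]
    omega

-- the flat table split into its five priority blocks
lemma vibeKeywords_split :
    vibeKeywords =
      (["street food", "street", "pita", "sandwich", "panini", "falafel"].map (fun w => (w, 0)))
   ++ (["gastronomique", "fine dining", "étoile", "omakase"].map (fun w => (w, 1)))
   ++ (["bar à vin", "bar a vin", "wine bar", "cave", "tapas"].map (fun w => (w, 2)))
   ++ (["bistrot", "bistro", "bouchon", "troquet", "cantine"].map (fun w => (w, 3)))
   ++ (["boulangerie", "café", "cafe", "patisserie", "pâtisserie"].map (fun w => (w, 4))) := rfl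

lemma matched_eq (s : List Char) :
    vibeKeywords.filterMap (fun wp => if PySem.Chars.isIn wp.1.toList s then some wp.2 else none)
    = List.replicate (["street food", "street", "pita", "sandwich", "panini", "falafel"].countP
        (fun w => PySem.Chars.isIn w.toList s)) 0
   ++ List.replicate (["gastronomique", "fine dining", "étoile", "omakase"].countP
        (fun w => PySem.Chars.isIn w.toList s)) 1
   ++ List.replicate (["bar à vin", "bar a vin", "wine bar", "cave", "tapas"].countP
        (fun w => PySem.Chars.isIn w.toList s)) 2
   ++ List.replicate (["bistrot", "bistro", "bouchon", "troquet", "cantine"].countP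
        (fun w => PySem.Chars.isIn w.toList s)) 3
   ++ List.replicate (["boulangerie", "café", "cafe", "patisserie", "pâtisserie"].countP
        (fun w => PySem.Chars.isIn w.toList s)) 4 := by
  rw [vibeKeywords_split]
  simp only [List.filterMap_append, List.filterMap_map, Function.comp_def]
  rw [blk_replicate, blk_replicate, blk_replicate, blk_replicate, blk_replicate]

-- ===== VERDICT =====
theorem get_vibe_spec : Claim_equal_get_vibe := by
  intro cuisine price tags_str _
  unfold Spec_get_vibe
  simp only [get_vibe, get_vibe_alt]
  set s := PySem.Chars.lower (cuisine.toList ++ " ".toList ++ tags_str.toList) with hs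
  rw [matched_eq]
  set c : String → Bool := fun w => PySem.Chars.isIn w.toList s with hc
  by_cases h0 : (["street food", "street", "pita", "sandwich", "panini", "falafel"].any c) = true
  · have hp : 0 < ["street food", "street", "pita", "sandwich", "panini", "falafel"].countP c :=
      by rw [List.countP_pos_iff]; exact List.any_eq_true.mp h0
    rw [minD_eq_of_mem_of_le _ 0 5
      (by simp only [List.mem_append, List.mem_replicate, and_true]; omega)
      (fun x _ => Nat.zero_le x)]
    simp [h0, vibeLabels]
  · have e0 : ["street food", "street", "pita", "sandwich", "panini", "falafel"].countP c = 0 :=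
      by rw [List.countP_eq_zero]; exact fun a ha => (List.any_eq_false.mp (by simp only [Bool.not_eq_true] at h0; exact h0) a ha)
    rw [e0]
    by_cases h1 : (["gastronomique", "fine dining", "étoile", "omakase"].any c) = true
    · have hp : 0 < ["gastronomique", "fine dining", "étoile", "omakase"].countP c :=
        by rw [List.countP_pos_iff]; exact List.any_eq_true.mp h1
      rw [minD_eq_of_mem_of_le _ 1 5
        (by simp only [List.mem_append, List.mem_replicate, and_true]; omega)
        (by intro x hx; simp only [List.mem_append, List.mem_replicate] at hx; omega)]
      simp [h0, h1, vibeLabels]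
    · have e1 : ["gastronomique", "fine dining", "étoile", "omakase"].countP c = 0 :=
        by rw [List.countP_eq_zero]; exact fun a ha => (List.any_eq_false.mp (by simp only [Bool.not_eq_true] at h1; exact h1) a ha)
      rw [e1]
      by_cases h2 : (["bar à vin", "bar a vin", "wine bar", "cave", "tapas"].any c) = true
      · have hp : 0 < ["bar à vin", "bar a vin", "wine bar", "cave", "tapas"].countP c :=
          by rw [List.countP_pos_iff]; exact List.any_eq_true.mp h2
        rw [minD_eq_of_mem_of_le _ 2 5
          (by simp only [List.mem_append, List.mem_replicate, and_true]; omega)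
          (by intro x hx; simp only [List.mem_append, List.mem_replicate] at hx; omega)]
        simp [h0, h1, h2, vibeLabels]
      · have e2 : ["bar à vin", "bar a vin", "wine bar", "cave", "tapas"].countP c = 0 :=
          by rw [List.countP_eq_zero]; exact fun a ha => (List.any_eq_false.mp (by simp only [Bool.not_eq_true] at h2; exact h2) a ha)
        rw [e2]
        by_cases h3 : (["bistrot", "bistro", "bouchon", "troquet", "cantine"].any c) = true
        · have hp : 0 < ["bistrot", "bistro", "bouchon", "troquet", "cantine"].countP c :=
            by rw [List.countP_pos_iff]; exact List.any_eq_true.mp h3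
          rw [minD_eq_of_mem_of_le _ 3 5
            (by simp only [List.mem_append, List.mem_replicate, and_true]; omega)
            (by intro x hx; simp only [List.mem_append, List.mem_replicate] at hx; omega)]
          simp [h0, h1, h2, h3, vibeLabels]
        · have e3 : ["bistrot", "bistro", "bouchon", "troquet", "cantine"].countP c = 0 :=
            by rw [List.countP_eq_zero]; exact fun a ha => (List.any_eq_false.mp (by simp only [Bool.not_eq_true] at h3; exact h3) a ha)
          rw [e3]
          by_cases h4 : (["boulangerie", "café", "cafe", "patisserie", "pâtisserie"].any c) = true
          · have hp : 0 < ["boulangerie", "café", "cafe", "patisserie", "pâtisserie"].countP c :=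
              by rw [List.countP_pos_iff]; exact List.any_eq_true.mp h4
            rw [minD_eq_of_mem_of_le _ 4 5
              (by simp only [List.mem_append, List.mem_replicate, and_true]; omega)
              (by intro x hx; simp only [List.mem_append, List.mem_replicate] at hx; omega)]
            simp [h0, h1, h2, h3, h4, vibeLabels]
          · have e4 : ["boulangerie", "café", "cafe", "patisserie", "pâtisserie"].countP c = 0 :=
              by rw [List.countP_eq_zero]; exact fun a ha => (List.any_eq_false.mp (by simp only [Bool.not_eq_true] at h4; exact h4) a ha)
            rw [e4]
            simp [h0, h1, h2, h3, h4, vibeLabels, PySem.List.minD, PySem.List.min?]
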